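-- pv_equiv track=rewrite | github.com/justseul/Baekjoon | 프로그래머스/1/42840. 모의고사/모의고사.py | solution
-- ===== SOURCE A (Python) =====
-- def solution(answers):
--     n = len(answers)
--     p1 = [1, 2, 3, 4, 5] *n
--     p2 = [2, 1, 2, 3, 2, 4, 2, 5]*n
--     p3 = [3, 3, 1, 1, 2, 2, 4, 4, 5, 5]*n
--     answer = [0,0,0]
--     for i in range(n):
--         if p1[i] == answers[i]:
--             answer[0] += 1
--         if p2[i] == answers[i]:
--             answer[1] += 1
--         if p3[i] == answers[i]:
--             answer[2] += 1
--     final = []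
--     for i in range(len(answer)):
--         if max(answer) == answer[i]:
--             final.append(i+1)
--     return final
-- ===== SOURCE B (Python) =====
-- def solution(answers):
--     # Histogram pass: count answers by (position mod 40, value); 40 = lcm(5, 8, 10),
--     # so each pattern's score is a fixed 40-term sum over the histogram.
--     cnt = {}
--     for i, a in enumerate(answers):
--         key = (i % 40, a)
--         cnt[key] = cnt.get(key, 0) + 1
--     patterns = [[1, 2, 3, 4, 5],
--                 [2, 1, 2, 3, 2, 4, 2, 5],
--                 [3, 3, 1, 1, 2, 2, 4, 4, 5, 5]]
--     scores = [sum(cnt.get((r, p[r % len(p)]), 0) for r in range(40)) for p in patterns]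
--     m = max(scores)
--     return [k + 1 for k in range(3) if scores[k] == m]
-- ===== Notes on version B (the rewrite author's own statement) =====
-- stated objective: alternative
-- what changed: Instead of materialising each pattern repeated n times and comparing all three against answers position by position in one loop, B builds a (position mod 40, value) histogram dict in one pass (40 = lcm of the pattern lengths) and reads each pattern's score off the histogram as a fixed 40-term sum of lookups, then filters range(3) by the maximum score.
import Mathlib
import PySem

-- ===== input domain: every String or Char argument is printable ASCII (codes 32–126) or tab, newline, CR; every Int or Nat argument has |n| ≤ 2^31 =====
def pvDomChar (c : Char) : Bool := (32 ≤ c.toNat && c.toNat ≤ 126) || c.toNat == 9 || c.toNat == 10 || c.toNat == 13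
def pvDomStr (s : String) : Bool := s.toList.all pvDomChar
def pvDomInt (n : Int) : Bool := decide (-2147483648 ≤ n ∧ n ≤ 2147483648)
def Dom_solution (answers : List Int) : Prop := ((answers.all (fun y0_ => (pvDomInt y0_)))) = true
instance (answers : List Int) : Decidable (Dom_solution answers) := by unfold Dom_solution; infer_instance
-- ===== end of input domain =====

-- B replaces A's simultaneous three-way comparison loop over fully materialised repeated
-- lists by a (position mod 40, value) histogram built in one pass, from which each
-- pattern's score is a fixed 40-term table lookup sum ('alternative').

-- ===== PORT A =====
def solution (answers : List Int) : List Int :=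
  let n := answers.length
  let p1 := (List.replicate n ([1, 2, 3, 4, 5] : List Int)).flatten
  let p2 := (List.replicate n ([2, 1, 2, 3, 2, 4, 2, 5] : List Int)).flatten
  let p3 := (List.replicate n ([3, 3, 1, 1, 2, 2, 4, 4, 5, 5] : List Int)).flatten
  let answer := (PySem.List.pyRange 0 (n : Int) 1).foldl
    (fun (acc : Int × Int × Int) i =>
      let acc := if PySem.List.pyGet? p1 i = PySem.List.pyGet? answers i then
        (acc.1 + 1, acc.2.1, acc.2.2) else acc
      let acc := if PySem.List.pyGet? p2 i = PySem.List.pyGet? answers i then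
        (acc.1, acc.2.1 + 1, acc.2.2) else acc
      if PySem.List.pyGet? p3 i = PySem.List.pyGet? answers i then
        (acc.1, acc.2.1, acc.2.2 + 1) else acc)
    (0, 0, 0)
  let answerL : List Int := [answer.1, answer.2.1, answer.2.2]
  -- max(answer): answer has 3 elements, so Python's max never raises; getD 0 is unreachable
  let m := (PySem.List.max? answerL (fun x => x)).getD 0
  (PySem.List.pyRange 0 3 1).foldl
    (fun final i => if m = PySem.List.pyGetD answerL i 0 then final ++ [i + 1] else final) []

-- ===== PORT B =====
-- key = (i % 40, a)
def keyOf (ia : Int × Int) : Int × Int := (PySem.Int.mod ia.1 40, ia.2)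

def solution_alt (answers : List Int) : List Int :=
  let cnt := (PySem.List.enumerate answers).foldl
    (fun (d : PySem.Dict (Int × Int) Int) ia =>
      d.insert (keyOf ia) (d.getD (keyOf ia) 0 + 1))
    PySem.Dict.empty
  let patterns : List (List Int) :=
    [[1, 2, 3, 4, 5], [2, 1, 2, 3, 2, 4, 2, 5], [3, 3, 1, 1, 2, 2, 4, 4, 5, 5]]
  let scores := patterns.map (fun p =>
    ((PySem.List.pyRange 0 40 1).map (fun r =>
      -- p[r % len(p)]: 0 ≤ r % len p < len p, so indexing never raises; the default is unreachable
      cnt.getD (r, PySem.List.pyGetD p (PySem.Int.mod r (p.length : Int)) 0) 0)).sum)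
  -- max(scores): scores has 3 elements, never raises; getD 0 unreachable
  let m := (PySem.List.max? scores (fun x => x)).getD 0
  ((PySem.List.pyRange 0 3 1).filter
    (fun k => PySem.List.pyGetD scores k 0 = m)).map (fun k => k + 1)

-- ===== PRECONDITION & SPEC =====
def Spec_solution (answers : List Int) (out : List Int) : Prop := out = solution_alt answers
instance (answers : List Int) (out : List Int) : Decidable (Spec_solution answers out) := by unfold Spec_solution; infer_instance

-- ===== CLAIM (what is proved, stated in full; the proofs are below) =====
def Claim_equal_solution : Prop := ∀ (answers : List Int), Dom_solution answers → Spec_solution answers (solution answers)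

-- ===== LEMMAS AND PROOFS =====

-- indexing a Python 'base * n' list: (replicate n base).flatten[i] = base[i % len base]
lemma flat_rep_getElem? {α : Type} (base : List α) (n i : Nat)
    (hi : i < n * base.length) :
    ((List.replicate n base).flatten)[i]? = base[i % base.length]? := by
  induction n generalizing i with
  | zero => omega
  | succ k ih =>
    rw [List.replicate_succ, List.flatten_cons]
    by_cases h : i < base.length
    · rw [List.getElem?_append_left h, Nat.mod_eq_of_lt h]
    · have hb : base.length ≤ i := by omega
      rw [Nat.succ_mul] at hi
      rw [List.getElem?_append_right hb, ih (i - base.length) (by omega)]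
      rw [Nat.mod_eq_sub_mod hb]

-- A's counting loop computes three independent countP's
lemma foldl_triple {α : Type} (q1 q2 q3 : α → Prop)
    [DecidablePred q1] [DecidablePred q2] [DecidablePred q3]
    (l : List α) (a b c : Int) :
    l.foldl (fun (acc : Int × Int × Int) i =>
      let acc := if q1 i then (acc.1 + 1, acc.2.1, acc.2.2) else acc
      let acc := if q2 i then (acc.1, acc.2.1 + 1, acc.2.2) else acc
      if q3 i then (acc.1, acc.2.1, acc.2.2 + 1) else acc) (a, b, c)
    = (a + (l.countP (fun i => decide (q1 i)) : Int),
       b + (l.countP (fun i => decide (q2 i)) : Int),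
       c + (l.countP (fun i => decide (q3 i)) : Int)) := by
  induction l generalizing a b c with
  | nil => simp
  | cons x t ih =>
    simp only [List.foldl_cons, List.countP_cons]
    by_cases h1 : q1 x <;> by_cases h2 : q2 x <;> by_cases h3 : q3 x <;>
      simp [h1, h2, h3, ih, Prod.ext_iff] <;> omega

-- summing one element's indicator over a duplicate-free residue list
lemma sum_indicator_single (rs : List Int) (hnd : rs.Nodup) (g : Int → Int)
    (i a : Int) (hi : i ∈ rs) :
    (rs.map (fun r => if (i, a) = (r, g r) then (1 : Int) else 0)).sum
      = if a = g i then 1 else 0 := by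
  induction rs with
  | nil => cases hi
  | cons r t ih =>
    rcases List.nodup_cons.mp hnd with ⟨hrt, hndt⟩
    simp only [List.map_cons, List.sum_cons]
    rcases List.mem_cons.mp hi with rfl | h
    · have hz : (t.map (fun r => if (i, a) = (r, g r) then (1 : Int) else 0)).sum = 0 := by
        apply List.sum_eq_zero; intro x hx
        rcases List.mem_map.mp hx with ⟨y, hy, rfl⟩
        have hne : ¬ (i, a) = (y, g y) := by
          intro heq
          have h1 : i = y := congrArg Prod.fst heq
          exact hrt (h1 ▸ hy)
        simp [hne]
      rw [hz]
      by_cases h : a = g i <;> simp [h, Prod.ext_iff]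
    · have hir : i ≠ r := fun e => hrt (e ▸ h)
      rw [ih hndt h]
      simp [Prod.ext_iff, hir]

-- sum over distinct residues of pair-counts = one countP over the pair list
lemma sum_count_eq_countP (rs : List Int) (hnd : rs.Nodup) (g : Int → Int)
    (K : List (Int × Int)) (hK : ∀ p ∈ K, p.1 ∈ rs) :
    (rs.map (fun r => (K.count (r, g r) : Int))).sum
      = (K.countP (fun p => decide (p.2 = g p.1)) : Int) := by
  induction K with
  | nil => simp
  | cons x t ih =>
    have hsum : ∀ r : Int,
        ((x :: t).count (r, g r) : Int)
          = (if (x.1, x.2) = (r, g r) then (1 : Int) else 0) + (t.count (r, g r) : Int) := by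
      intro r
      rw [List.count_cons]
      by_cases h : x = (r, g r) <;> simp [h, Prod.ext_iff] at * <;> omega
    have : (rs.map (fun r => ((x :: t).count (r, g r) : Int))).sum
        = (rs.map (fun r => if (x.1, x.2) = (r, g r) then (1 : Int) else 0)).sum
          + (rs.map (fun r => (t.count (r, g r) : Int))).sum := by
      simp only [hsum]
      rw [← List.sum_map_add]
    rw [this, ih (fun p hp => hK p (List.mem_cons_of_mem x hp)),
        sum_indicator_single rs hnd g x.1 x.2 (hK x List.mem_cons_self)]
    rw [List.countP_cons]
    by_cases h : x.2 = g x.1 <;> simp [h] <;> ring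

-- fmod into [0, 40) lands in pyRange 0 40 1
lemma mod40_mem (x : Int) : PySem.Int.mod x 40 ∈ PySem.List.pyRange 0 40 1 := by
  have h0 : 0 ≤ PySem.Int.mod x 40 := by
    simp [PySem.Int.mod, Int.fmod_eq_emod]; exact Int.emod_nonneg x (by norm_num)
  have h1 : PySem.Int.mod x 40 < 40 := by
    simp [PySem.Int.mod, Int.fmod_eq_emod]; exact Int.emod_lt_of_pos x (by norm_num)
  have : PySem.List.pyRange 0 40 1 = (List.range 40).map (Int.ofNat) := by decide
  rw [this, List.mem_map]
  exact ⟨(PySem.Int.mod x 40).toNat, List.mem_range.mpr (by omega),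
    Int.toNat_of_nonneg h0⟩

lemma pyRange40_nodup : (PySem.List.pyRange 0 40 1).Nodup := by decide

-- B's per-pattern histogram sum equals the corresponding countP over range n
lemma scoreB_eq (p : List Int) (hp : p ≠ []) (hd : p.length ∣ 40) (answers : List Int) :
    ((PySem.List.pyRange 0 40 1).map (fun r =>
      (((PySem.List.enumerate answers).foldl
        (fun (d : PySem.Dict (Int × Int) Int) ia =>
          d.insert (keyOf ia) (d.getD (keyOf ia) 0 + 1))
        PySem.Dict.empty).getD
          (r, PySem.List.pyGetD p (PySem.Int.mod r (p.length : Int)) 0) 0))).sum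
      = ((List.range answers.length).countP
          (fun k : Nat => decide (PySem.List.pyGet?
              ((List.replicate answers.length p).flatten) ((k : Nat) : Int)
            = PySem.List.pyGet? answers ((k : Nat) : Int))) : Int) := by
  have hlen : 0 < p.length := List.length_pos_of_ne_nil hp
  -- the counter dict
  have hcnt : (PySem.List.enumerate answers).foldl
      (fun (d : PySem.Dict (Int × Int) Int) ia =>
        d.insert (keyOf ia) (d.getD (keyOf ia) 0 + 1)) PySem.Dict.empty
      = PySem.Dict.counter ((PySem.List.enumerate answers).map keyOf) := by
    rw [← PySem.Dict.foldl_insert_getD_add_one_eq_counter, List.foldl_map]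
  rw [hcnt]
  simp only [PySem.Dict.getD_counter]
  -- define the target function g
  set g : Int → Int := fun r => PySem.List.pyGetD p (PySem.Int.mod r (p.length : Int)) 0 with hg
  rw [sum_count_eq_countP (PySem.List.pyRange 0 40 1) pyRange40_nodup g
    ((PySem.List.enumerate answers).map keyOf)
    (by
      intro q hq
      simp only [List.mem_map] at hq
      obtain ⟨ia, _, rfl⟩ := hq
      exact mod40_mem ia.1)]
  rw [List.countP_map]
  rw [PySem.List.enumerate_eq_map_pyRange (d := 0)]
  simp only [PySem.List.len_eq, PySem.List.pyRange_zero_natCast, List.countP_map]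
  apply congrArg
  apply List.countP_congr
  intro i hi
  have hin : i < answers.length := List.mem_range.mp hi
  -- both sides reduce to answers[i] = p[i % len p]
  have hmodp : ∀ x : Int, 0 ≤ x → PySem.Int.mod x (p.length : Int) = ((x.toNat % p.length : Nat) : Int) := by
    intro x hx
    simp only [PySem.Int.mod, Int.fmod_eq_emod]
    push_cast [Int.toNat_of_nonneg hx]
    have hl : (0:Int) ≤ (p.length : Int) := by exact_mod_cast hlen.le
    simp [hl]
  have hmod40 : PySem.Int.mod (i : Int) 40 = ((i % 40 : Nat) : Int) := by
    simp only [PySem.Int.mod, Int.fmod_eq_emod]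
    omega
  have hmm : (i % 40) % p.length = i % p.length := Nat.mod_mod_of_dvd i hd
  simp only [Function.comp_def, keyOf, hmod40, hg]
  rw [hmodp _ (by positivity)]
  simp only [Int.toNat_natCast, hmm]
  simp only [PySem.List.pyGet?_natCast, PySem.List.pyGetD_natCast]
  rw [flat_rep_getElem? p answers.length i (by nlinarith)]
  rw [List.getElem?_eq_getElem (Nat.mod_lt _ hlen),
      List.getElem?_eq_getElem hin,
      List.getD_eq_getElem _ _ hin,
      List.getD_eq_getElem _ _ (Nat.mod_lt _ hlen)]
  simp [eq_comm]

-- A's selection loop over range(3) equals B's filter-map over range(3)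
lemma final_stage (a b c m : Int) :
    (PySem.List.pyRange 0 3 1).foldl
      (fun final i => if m = PySem.List.pyGetD ([a, b, c] : List Int) i 0
                      then final ++ [i + 1] else final) []
    = ((PySem.List.pyRange 0 3 1).filter
        (fun k => PySem.List.pyGetD ([a, b, c] : List Int) k 0 = m)).map (fun k => k + 1) := by
  rw [show PySem.List.pyRange 0 3 1 = [0, 1, 2] from by decide]
  simp [PySem.List.pyGetD]
  by_cases h1 : a = m <;> by_cases h2 : b = m <;> by_cases h3 : c = m <;>
    simp [h1, h2, h3, eq_comm]

-- ===== VERDICT (by name: the statement is the Claim_ definition above) =====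
theorem solution_spec : Claim_equal_solution := by
  intro answers _
  show solution answers = solution_alt answers
  rw [solution, solution_alt]
  simp only [PySem.List.pyRange_zero_natCast, List.foldl_map]
  rw [foldl_triple
    (fun k : Nat => PySem.List.pyGet?
        ((List.replicate answers.length ([1, 2, 3, 4, 5] : List Int)).flatten) ((k : Nat) : Int)
      = PySem.List.pyGet? answers ((k : Nat) : Int))
    (fun k : Nat => PySem.List.pyGet?
        ((List.replicate answers.length ([2, 1, 2, 3, 2, 4, 2, 5] : List Int)).flatten) ((k : Nat) : Int)
      = PySem.List.pyGet? answers ((k : Nat) : Int))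
    (fun k : Nat => PySem.List.pyGet?
        ((List.replicate answers.length ([3, 3, 1, 1, 2, 2, 4, 4, 5, 5] : List Int)).flatten) ((k : Nat) : Int)
      = PySem.List.pyGet? answers ((k : Nat) : Int))]
  simp only [List.map_cons, List.map_nil]
  simp only [scoreB_eq ([1, 2, 3, 4, 5] : List Int) (by decide) (by decide) answers,
      scoreB_eq ([2, 1, 2, 3, 2, 4, 2, 5] : List Int) (by decide) (by decide) answers,
      scoreB_eq ([3, 3, 1, 1, 2, 2, 4, 4, 5, 5] : List Int) (by decide) (by decide) answers,
      zero_add]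
  exact final_stage _ _ _ _
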